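-- pv_equiv track=rewrite | github.com/PeterVWU/vaporider-sku-map | csv_mapper.py | fill_missing_titles
-- ===== SOURCE A (Python) =====
-- from typing import Dict, List, Optional
--
-- def fill_missing_titles(sheet2_data: List[Dict[str, str]]) -> List[Dict[str, str]]:
--     """Fill empty titles with the first title from the same handle group."""
--     handle_titles = {}
--
--     # First pass: collect first title for each handle
--     for row in sheet2_data:
--         handle = row.get('Handle', '').strip()
--         title = row.get('Title', '').strip()
--
--         if handle and title and handle not in handle_titles:
--             handle_titles[handle] = title
--
--     # Second pass: fill missing titles
--     for row in sheet2_data: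
--         handle = row.get('Handle', '').strip()
--         if handle and not row.get('Title', '').strip():
--             if handle in handle_titles:
--                 row['Title'] = handle_titles[handle]
--
--     return sheet2_data
-- ===== SOURCE B (Python) =====
-- # B: no dict of first titles; snapshot stripped (handle, title) pairs once, then
-- # for each blank-title row do a direct first-match linear search over the snapshot.
-- from typing import Dict, List
--
-- def fill_missing_titles(sheet2_data: List[Dict[str, str]]) -> List[Dict[str, str]]:
--     stripped = [(row.get('Handle', '').strip(), row.get('Title', '').strip())
--                 for row in sheet2_data]
--     for row, (handle, title) in zip(sheet2_data, stripped):
--         if handle and not title: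
--             for h, t in stripped:
--                 if h == handle and t:
--                     row['Title'] = t
--                     break
--     return sheet2_data
-- ===== Notes on version B (the rewrite author's own statement) =====
-- stated objective: alternative
-- what changed: Replaced A's dict-of-first-titles built in a first pass with a precomputed snapshot of stripped (handle, title) pairs plus a direct first-match linear search over the snapshot for each blank-title row.
import Mathlib
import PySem

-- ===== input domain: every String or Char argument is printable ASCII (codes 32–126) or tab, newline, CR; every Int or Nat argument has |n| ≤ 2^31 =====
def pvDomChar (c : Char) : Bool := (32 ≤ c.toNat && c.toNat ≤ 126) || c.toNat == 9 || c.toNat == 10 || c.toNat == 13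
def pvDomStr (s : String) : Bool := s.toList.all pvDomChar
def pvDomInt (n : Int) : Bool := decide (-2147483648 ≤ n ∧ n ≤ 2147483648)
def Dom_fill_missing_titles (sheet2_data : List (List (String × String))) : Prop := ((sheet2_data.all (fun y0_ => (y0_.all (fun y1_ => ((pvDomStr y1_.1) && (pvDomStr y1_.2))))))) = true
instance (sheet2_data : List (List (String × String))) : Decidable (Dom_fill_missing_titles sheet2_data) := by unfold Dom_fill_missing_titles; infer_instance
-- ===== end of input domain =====

-- B replaces A's first-pass dict of first titles by a stripped snapshot plus a
-- first-match linear search per blank row (alternative decomposition, not faster).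
-- Both Pythons mutate the rows in place; the equivalence proved is about the returned value.

-- ===== PORT A =====
def pvStepA (ht : PySem.Dict String String) (row : List (String × String)) : PySem.Dict String String :=
  let handle := PySem.Str.strip ((PySem.Dict.mk row).getD "Handle" "")
  let title  := PySem.Str.strip ((PySem.Dict.mk row).getD "Title" "")
  if handle ≠ "" ∧ title ≠ "" ∧ ht.contains handle = false then ht.insert handle title else ht

def pvFillA (ht : PySem.Dict String String) (row : List (String × String)) : List (String × String) :=
  let handle := PySem.Str.strip ((PySem.Dict.mk row).getD "Handle" "")
  if handle ≠ "" ∧ PySem.Str.strip ((PySem.Dict.mk row).getD "Title" "") = "" then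
    match ht.get? handle with
    | some t => ((PySem.Dict.mk row).insert "Title" t).items
    | none => row
  else row

def fill_missing_titles (sheet2_data : List (List (String × String))) : List (List (String × String)) :=
  let ht := sheet2_data.foldl pvStepA PySem.Dict.empty
  sheet2_data.map (pvFillA ht)

-- ===== PORT B =====
def pvStrip2 (row : List (String × String)) : String × String :=
  (PySem.Str.strip ((PySem.Dict.mk row).getD "Handle" ""),
   PySem.Str.strip ((PySem.Dict.mk row).getD "Title" ""))

def pvFillB (stripped : List (String × String))
    (rp : List (String × String) × (String × String)) : List (String × String) :=
  if rp.2.1 ≠ "" ∧ rp.2.2 = "" then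
    match stripped.find? (fun p => p.1 == rp.2.1 && p.2 != "") with
    | some p => ((PySem.Dict.mk rp.1).insert "Title" p.2).items
    | none => rp.1
  else rp.1

def fill_missing_titles_alt (sheet2_data : List (List (String × String))) : List (List (String × String)) :=
  let stripped := sheet2_data.map pvStrip2
  (sheet2_data.zip stripped).map (pvFillB stripped)

-- ===== PRECONDITION & SPEC =====
def Spec_fill_missing_titles (sheet2_data : List (List (String × String))) (out : List (List (String × String))) : Prop := out = fill_missing_titles_alt sheet2_data
instance (sheet2_data : List (List (String × String))) (out : List (List (String × String))) : Decidable (Spec_fill_missing_titles sheet2_data out) := by unfold Spec_fill_missing_titles; infer_instance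

-- ===== CLAIM (what is proved, stated in full; the proofs are below) =====
def Claim_equal_fill_missing_titles : Prop := ∀ (sheet2_data : List (List (String × String))), Dom_fill_missing_titles sheet2_data → Spec_fill_missing_titles sheet2_data (fill_missing_titles sheet2_data)

-- ===== LEMMAS AND PROOFS =====

theorem pv_zip_map_map {α β γ : Type} (f : α → β) (g : α × β → γ) :
    ∀ xs : List α, (xs.zip (xs.map f)).map g = xs.map (fun x => g (x, f x))
  | [] => rfl
  | x :: xs => by simp [pv_zip_map_map f g xs]

-- the dict A builds looks up a non-empty handle to the first matching stripped title
theorem pv_ht_get?_eq (h : String) (hne : h ≠ "") :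
    ∀ (xs : List (List (String × String))) (ht : PySem.Dict String String),
      (xs.foldl pvStepA ht).get? h =
        (match ht.get? h with
         | some v => some v
         | none => ((xs.map pvStrip2).find? (fun p => p.1 == h && p.2 != "")).map Prod.snd) := by
  intro xs
  induction xs with
  | nil => intro ht; cases hht : ht.get? h <;> simp [hht]
  | cons row rest ih =>
    intro ht
    simp only [List.foldl_cons, List.map_cons, List.find?_cons]
    rw [ih]
    have hstep : pvStepA ht row =
        if (pvStrip2 row).1 ≠ "" ∧ (pvStrip2 row).2 ≠ "" ∧ ht.contains (pvStrip2 row).1 = false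
        then ht.insert (pvStrip2 row).1 (pvStrip2 row).2 else ht := rfl
    by_cases hhd : (pvStrip2 row).1 = h
    · by_cases htd : (pvStrip2 row).2 = ""
      · -- head title blank: neither the fold step (title = "") nor find? fires at the head
        have : pvStepA ht row = ht := by
          rw [hstep]; simp [htd]
        rw [this]
        simp [hhd, htd]
      · cases hht : ht.get? h with
        | some v =>
          have hcont : ht.contains (pvStrip2 row).1 = true := by
            rw [PySem.Dict.contains_eq_isSome_get?, hhd, hht]; rfl
          have : pvStepA ht row = ht := by
            rw [hstep]; simp [hcont]
          rw [this, hht]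
        | none =>
          have hcont : ht.contains (pvStrip2 row).1 = false := by
            rw [PySem.Dict.contains_eq_isSome_get?, hhd, hht]; rfl
          have : pvStepA ht row = ht.insert (pvStrip2 row).1 (pvStrip2 row).2 := by
            rw [hstep]; simp [hcont, htd, hhd ▸ hne]
          have hg : (ht.insert (pvStrip2 row).1 (pvStrip2 row).2).get? h = some (pvStrip2 row).2 := by
            rw [← hhd]; simp [PySem.Dict.get?_insert_self]
          have hcond : ((pvStrip2 row).1 == h && (pvStrip2 row).2 != "") = true := by
            simp [hhd, htd]
          rw [this, hg, hcond]; rfl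
    · -- head handle differs from h: lookup at h unchanged, find? skips the head
      have hget : (pvStepA ht row).get? h = ht.get? h := by
        have hne' : ¬ (h = (pvStrip2 row).1) := fun e => hhd (Eq.symm e)
        rw [hstep]
        split
        · rw [PySem.Dict.get?_insert, if_neg hne']
        · rfl
      rw [hget]
      have : ((pvStrip2 row).1 == h) = false := by simp [hhd]
      simp [this]

-- ===== VERDICT (by name: the statement is the Claim_ definition above) =====
theorem fill_missing_titles_spec : Claim_equal_fill_missing_titles := by
  intro xs _
  unfold Spec_fill_missing_titles fill_missing_titles fill_missing_titles_alt
  rw [pv_zip_map_map]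
  apply List.map_congr_left
  intro row hrow
  show pvFillA _ row = pvFillB _ (row, pvStrip2 row)
  unfold pvFillA pvFillB
  simp only [pvStrip2]
  by_cases hc : PySem.Str.strip ((PySem.Dict.mk row).getD "Handle" "") ≠ "" ∧
      PySem.Str.strip ((PySem.Dict.mk row).getD "Title" "") = ""
  · rw [if_pos hc, if_pos hc]
    have hh := pv_ht_get?_eq _ hc.1 xs PySem.Dict.empty
    rw [PySem.Dict.get?_empty] at hh
    rw [hh]
    cases hfind : (xs.map pvStrip2).find? (fun p => p.1 == PySem.Str.strip ((PySem.Dict.mk row).getD "Handle" "") && p.2 != "") with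
    | none => rfl
    | some p => rfl
  · rw [if_neg hc, if_neg hc]
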